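-- pv_equiv track=rewrite | github.com/KarimElbarbary99/Symbolic-AI-and-Logic-Based-Systems-project- | Solve Nonograms/Approach1_hex_solver.py | remove_redundant_elements
-- ===== SOURCE A (Python) =====
-- def remove_redundant_elements(data):
--     cleaned_data = []
--     for sublist in data:
--         # Convert the string to a list of integers
--         numbers = list(map(int, sublist[0].split()))
--         # Remove duplicates by converting to a set and back to a list
--         numbers = list(set(numbers))
--         # Sort the numbers if required (optional)
--         numbers.sort()
--         # Convert the list back to a string
--         cleaned_data.append([' '.join(map(str, numbers))])
--     return cleaned_data
-- ===== SOURCE B (Python) =====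
-- def remove_redundant_elements(data):
--     if not data:
--         return []
--     nums = sorted(int(t) for t in data[0][0].split())
--     kept = [nums[i] for i in range(len(nums)) if i == 0 or nums[i] != nums[i - 1]]
--     return [[' '.join(str(v) for v in kept)]] + remove_redundant_elements(data[1:])
-- ===== Notes on version B (the rewrite author's own statement) =====
-- stated objective: alternative
-- what changed: Recursion over the rows instead of a loop, and per row the hash-set dedup followed by a sort is replaced by sort-first then an indexed comprehension that keeps nums[i] only when it differs from nums[i-1].
import Mathlib
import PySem

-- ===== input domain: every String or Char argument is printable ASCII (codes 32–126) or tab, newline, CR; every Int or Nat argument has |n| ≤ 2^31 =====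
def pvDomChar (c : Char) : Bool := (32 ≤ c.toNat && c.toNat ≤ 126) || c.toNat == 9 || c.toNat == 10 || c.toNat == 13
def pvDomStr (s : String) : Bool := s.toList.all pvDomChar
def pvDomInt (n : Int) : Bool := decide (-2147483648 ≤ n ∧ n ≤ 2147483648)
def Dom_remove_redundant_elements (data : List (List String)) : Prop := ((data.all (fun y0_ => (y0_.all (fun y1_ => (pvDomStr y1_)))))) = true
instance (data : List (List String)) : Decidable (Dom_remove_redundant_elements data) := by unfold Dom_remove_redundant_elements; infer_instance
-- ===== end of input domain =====

-- B recurses over the rows instead of looping, and per row replaces A's hash-set dedup + sort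
-- by sort-first followed by an indexed comprehension keeping nums[i] only when nums[i] ≠ nums[i-1]
-- (alternative decomposition, same cost).

-- ===== PORT A =====
-- per-sublist body of A's for-loop: parse, set-dedup, sort, join
def pvACell (sublist : List String) : List String :=
  let numbers := (PySem.Str.split₀ (PySem.List.pyGetD sublist 0 "")).map
      (fun t => (PySem.Int.ofStr? t).getD 0)   -- total form of int(t); Pre_ excludes failing tokens
  let numbers := PySem.Set.ofList numbers
  let numbers := PySem.List.sorted numbers (fun x => x) false
  [PySem.Str.join " " (numbers.map PySem.Int.toStr)]

def remove_redundant_elements (data : List (List String)) : List (List String) :=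
  data.foldl (fun cleaned_data sublist => cleaned_data ++ [pvACell sublist]) []

-- ===== PORT B =====
-- Source B's recursion: base case [], else handle data[0] and recurse on data[1:].
-- range(len(nums)) is ported as List.range (indices are in range, so Nat getD is exact);
-- the i == 0 disjunct short-circuits in Python before nums[i-1] is read, so Nat `i - 1` is exact too.
def remove_redundant_elements_alt (data : List (List String)) : List (List String) :=
  match data with
  | [] => []
  | sublist :: rest =>
    let nums := PySem.List.sorted ((PySem.Str.split₀ (PySem.List.pyGetD sublist 0 "")).map
        (fun t => (PySem.Int.ofStr? t).getD 0)) (fun x => x) false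
    let kept := ((List.range nums.length).filter
        (fun i => i == 0 || !(nums.getD i 0 == nums.getD (i - 1) 0))).map
        (fun i => nums.getD i 0)
    [PySem.Str.join " " (kept.map PySem.Int.toStr)] :: remove_redundant_elements_alt rest

-- ===== PRECONDITION & SPEC =====
-- Pre_ excludes exactly the inputs where Python A raises: an empty sublist (IndexError on
-- sublist[0]) or a token of sublist[0].split() that int() rejects (ValueError).
def Pre_remove_redundant_elements (data : List (List String)) : Prop :=
  (data.all (fun sublist => !sublist.isEmpty &&
    (PySem.Str.split₀ (PySem.List.pyGetD sublist 0 "")).all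
      (fun t => (PySem.Int.ofStr? t).isSome))) = true
instance (data : List (List String)) : Decidable (Pre_remove_redundant_elements data) := by
  unfold Pre_remove_redundant_elements; infer_instance

def pvWitness_remove_redundant_elements : List (List String) := [["3 1 3"], ["+5 -5"]]

def Spec_remove_redundant_elements (data : List (List String)) (out : List (List String)) : Prop := out = remove_redundant_elements_alt data
instance (data : List (List String)) (out : List (List String)) : Decidable (Spec_remove_redundant_elements data out) := by unfold Spec_remove_redundant_elements; infer_instance

-- ===== CLAIM (what is proved, stated in full; the proofs are below) =====
def Claim_equal_remove_redundant_elements : Prop := ∀ (data : List (List String)), Dom_remove_redundant_elements data → Pre_remove_redundant_elements data → Spec_remove_redundant_elements data (remove_redundant_elements data)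

-- ===== LEMMAS AND PROOFS =====

-- monotonicity of indexing into a ≤-sorted list
lemma pv_getD_mono (nums : List Int) (h : nums.Pairwise (· ≤ ·))
    (i j : Nat) (hij : i ≤ j) (hj : j < nums.length) :
    nums.getD i 0 ≤ nums.getD j 0 := by
  rcases Nat.lt_or_eq_of_le hij with hlt | rfl
  · have hi : i < nums.length := lt_trans hlt hj
    rw [List.getD_eq_getElem nums 0 hi, List.getD_eq_getElem nums 0 hj]
    exact List.pairwise_iff_getElem.mp h i j hi hj hlt
  · exact le_refl _

-- the indexed comprehension over the sorted list equals A's sorted(set(·))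
lemma pv_kept_eq (nums0 : List Int) :
    ((List.range (PySem.List.sorted nums0 (fun x => x) false).length).filter
        (fun i => i == 0 || !((PySem.List.sorted nums0 (fun x => x) false).getD i 0 ==
                              (PySem.List.sorted nums0 (fun x => x) false).getD (i - 1) 0))).map
        (fun i => (PySem.List.sorted nums0 (fun x => x) false).getD i 0)
      = PySem.List.sorted (PySem.Set.ofList nums0) (fun x => x) false := by
  set nums := PySem.List.sorted nums0 (fun x => x) false with hnums
  set p : Nat → Bool := fun i => i == 0 || !(nums.getD i 0 == nums.getD (i - 1) 0) with hp
  set fl := (List.range nums.length).filter p with hfl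
  set kept := fl.map (fun i => nums.getD i 0) with hkept
  have hsorted : nums.Pairwise (· ≤ ·) := by
    simpa using PySem.List.sorted_pairwise (xs := nums0) (key := fun x => x)
  -- facts about members of fl
  have hmemfl : ∀ i ∈ fl, i < nums.length ∧ p i = true := by
    intro i hi
    rcases List.mem_filter.mp hi with ⟨hr, hpi⟩
    exact ⟨List.mem_range.mp hr, hpi⟩
  -- kept is strictly increasing
  have hpw : kept.Pairwise (· < ·) := by
    rw [hkept, List.pairwise_map]
    have hflpw : fl.Pairwise (· < ·) := (List.pairwise_lt_range).filter p
    rw [List.pairwise_iff_getElem]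
    intro a b ha hb hab
    have hxy : fl[a] < fl[b] := List.pairwise_iff_getElem.mp hflpw a b ha hb hab
    obtain ⟨hylt, hpy⟩ := hmemfl fl[b] (List.getElem_mem hb)
    obtain ⟨hxlt, _⟩ := hmemfl fl[a] (List.getElem_mem ha)
    have hy0 : fl[b] ≠ 0 := by omega
    have hne : nums.getD fl[b] 0 ≠ nums.getD (fl[b] - 1) 0 := by
      simp only [hp, Bool.or_eq_true, beq_iff_eq, Bool.not_eq_eq_eq_not, Bool.not_true,
        beq_eq_false_iff_ne, ne_eq] at hpy
      tauto
    have h1 : nums.getD (fl[b] - 1) 0 ≤ nums.getD fl[b] 0 :=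
      pv_getD_mono nums hsorted _ _ (Nat.sub_le _ _) hylt
    have h2 : nums.getD fl[a] 0 ≤ nums.getD (fl[b] - 1) 0 :=
      pv_getD_mono nums hsorted _ _ (by omega) (by omega)
    omega
  -- kept has the same members as nums0
  have hmem : ∀ z, z ∈ kept ↔ z ∈ nums0 := by
    intro z
    constructor
    · intro hz
      rcases List.mem_map.mp hz with ⟨i, hi, rfl⟩
      obtain ⟨hilt, _⟩ := hmemfl i hi
      have h1 : nums.getD i 0 ∈ nums := by
        rw [List.getD_eq_getElem nums 0 hilt]; exact List.getElem_mem hilt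
      rw [hnums, PySem.List.mem_sorted] at h1
      exact h1
    · intro hz
      have hz' : z ∈ nums := by rw [hnums]; simpa [PySem.List.mem_sorted] using hz
      rcases List.mem_iff_getElem.mp hz' with ⟨i, hi, hzi⟩
      have hex : ∃ k, ∃ hk : k < nums.length, nums[k] = z := ⟨i, hi, hzi⟩
      classical
      let i0 := Nat.find hex
      obtain ⟨hi0lt, hi0z⟩ := Nat.find_spec hex
      have hpi0 : p i0 = true := by
        by_cases h0 : i0 = 0
        · simp [hp, h0]
        · have hprev : i0 - 1 < nums.length := by omega
          have hne : nums[i0 - 1]'hprev ≠ z := by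
            intro hcontra
            exact Nat.find_min hex (by omega : i0 - 1 < i0) ⟨hprev, hcontra⟩
          simp only [hp, Bool.or_eq_true, beq_iff_eq, Bool.not_eq_eq_eq_not, Bool.not_true,
            beq_eq_false_iff_ne, ne_eq]
          right
          rw [List.getD_eq_getElem nums 0 hi0lt, List.getD_eq_getElem nums 0 hprev, hi0z]
          intro hcontra
          exact hne hcontra.symm
      refine List.mem_map.mpr ⟨i0, ?_, ?_⟩
      · exact List.mem_filter.mpr ⟨List.mem_range.mpr hi0lt, hpi0⟩
      · rw [List.getD_eq_getElem nums 0 hi0lt]; exact hi0z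
  have hnd : kept.Nodup := hpw.imp (fun h => ne_of_lt h)
  have hperm : kept.Perm (PySem.Set.ofList nums0) := by
    refine (List.perm_ext_iff_of_nodup hnd (PySem.Set.nodup_ofList nums0)).mpr ?_
    intro z
    rw [hmem z, PySem.Set.mem_ofList]
  exact (PySem.List.sorted_eq_of_perm_of_pairwise_lt (PySem.Set.ofList nums0) kept
    (fun x => x) hperm hpw).symm

-- per-sublist equality: A's cell equals the head B produces for that sublist
lemma pvCell_eq (sublist : List String) :
    pvACell sublist =
      [PySem.Str.join " "
        ((((List.range (PySem.List.sorted ((PySem.Str.split₀ (PySem.List.pyGetD sublist 0 "")).map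
              (fun t => (PySem.Int.ofStr? t).getD 0)) (fun x => x) false).length).filter
            (fun i => i == 0 ||
              !((PySem.List.sorted ((PySem.Str.split₀ (PySem.List.pyGetD sublist 0 "")).map
                    (fun t => (PySem.Int.ofStr? t).getD 0)) (fun x => x) false).getD i 0 ==
                (PySem.List.sorted ((PySem.Str.split₀ (PySem.List.pyGetD sublist 0 "")).map
                    (fun t => (PySem.Int.ofStr? t).getD 0)) (fun x => x) false).getD (i - 1) 0))).map
            (fun i => (PySem.List.sorted ((PySem.Str.split₀ (PySem.List.pyGetD sublist 0 "")).map
                (fun t => (PySem.Int.ofStr? t).getD 0)) (fun x => x) false).getD i 0)).map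
          PySem.Int.toStr)] := by
  unfold pvACell
  rw [pv_kept_eq]

-- row-wise map of A's cell equals B's recursion
lemma pv_map_eq (data : List (List String)) :
    data.map pvACell = remove_redundant_elements_alt data := by
  induction data with
  | nil => rfl
  | cons sublist rest ih =>
    simp only [List.map_cons, remove_redundant_elements_alt, ih]
    rw [pvCell_eq]

-- ===== VERDICT (by name: the statement is the Claim_ definition above) =====
theorem remove_redundant_elements_spec : Claim_equal_remove_redundant_elements := by
  intro data _ _
  unfold Spec_remove_redundant_elements remove_redundant_elements
  rw [PySem.List.foldl_append_singleton_eq_map, List.nil_append]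
  exact pv_map_eq data
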